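-- pv_equiv track=rewrite | github.com/tungbo20021/ChamThi | ChamDiem.py | process_answers
-- ===== SOURCE A (Python) =====
-- def process_answers(positions, answers):
--     combined2 = list(zip(positions, answers))
--     result_dict = {}
--     for (a, b), answer in combined2:
--         if b not in result_dict:
--             result_dict[b] = []
--         result_dict[b].append(answer)
--
--     # Tạo kết quả cuối cùng
--     final_result = []
--     for question in sorted(result_dict.keys()):
--         answers_list = result_dict[question]
--         if len(answers_list) == 0:
--             final_result.append(f"{question} - null")
--         elif len(answers_list) == 1:
--             final_result.append(f"{question} - {answers_list[0]}")
--         else: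
--             final_result.append(f"{question} - ({', '.join(answers_list)})")
--
--     return final_result
-- ===== SOURCE B (Python) =====
-- def process_answers(positions, answers):
--     # Sort the (position, answer) pairs by question key (stable), then emit one
--     # formatted line per run of equal keys in a single left-to-right scan.
--     pairs = sorted(zip(positions, answers), key=lambda pa: pa[0][1])
--     out = []
--     i, n = 0, len(pairs)
--     while i < n:
--         q = pairs[i][0][1]
--         j = i
--         while j < n and pairs[j][0][1] == q:
--             j += 1
--         grp = [ans for (_, ans) in pairs[i:j]]
--         if len(grp) == 1:
--             out.append(f"{q} - {grp[0]}")
--         else: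
--             out.append(f"{q} - ({', '.join(grp)})")
--         i = j
--     return out
-- ===== Notes on version B (the rewrite author's own statement) =====
-- stated objective: idiomatic
-- what changed: B replaces A's dict-of-lists grouping followed by a sorted-keys pass with a stable sort of the zipped (position, answer) pairs by question key and a single left-to-right scan over runs of equal keys, formatting each run directly.
import Mathlib
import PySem

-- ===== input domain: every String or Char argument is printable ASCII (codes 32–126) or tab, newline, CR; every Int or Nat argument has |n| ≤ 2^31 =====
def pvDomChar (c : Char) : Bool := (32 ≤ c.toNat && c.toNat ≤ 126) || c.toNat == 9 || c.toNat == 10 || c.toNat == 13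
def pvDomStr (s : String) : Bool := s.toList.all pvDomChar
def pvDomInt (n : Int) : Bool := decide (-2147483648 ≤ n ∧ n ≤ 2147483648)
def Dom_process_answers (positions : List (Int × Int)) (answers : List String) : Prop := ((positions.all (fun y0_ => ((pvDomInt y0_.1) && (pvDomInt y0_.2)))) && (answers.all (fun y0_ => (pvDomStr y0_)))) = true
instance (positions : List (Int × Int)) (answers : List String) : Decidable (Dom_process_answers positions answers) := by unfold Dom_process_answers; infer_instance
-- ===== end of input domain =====

-- B replaces A's dict-of-lists grouping + sorted-keys pass with a stable sort of the zipped
-- pairs by question key and a single scan over runs of equal keys (idiomatic; same result).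
-- ===== PORT A =====
-- f"{q} - ..." ported with PySem.Int.toStr; answers_list[0] = (pyGet? · 0).getD "" (exact: only
-- evaluated when the list has length 1).
def process_answers (positions : List (Int × Int)) (answers : List String) : List String :=
  let combined2 := positions.zip answers
  let result_dict : PySem.Dict Int (List String) :=
    combined2.foldl (fun d p =>
      let d' := if d.contains p.1.2 then d else d.insert p.1.2 []
      d'.modify p.1.2 [] (fun l => l ++ [p.2])) PySem.Dict.empty
  (PySem.List.sorted result_dict.keys (fun x => x) false).foldl (fun acc question =>
    let answers_list := result_dict.getD question []
    if answers_list.length == 0 then acc ++ [PySem.Int.toStr question ++ " - null"]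
    else if answers_list.length == 1 then
      acc ++ [PySem.Int.toStr question ++ " - " ++ ((PySem.List.pyGet? answers_list 0).getD "")]
    else
      acc ++ [PySem.Int.toStr question ++ " - (" ++ PySem.Str.join ", " answers_list ++ ")"]) []

-- ===== PORT B =====
-- B's inner index scan 'while j < n and pairs[j][0][1] == q' collects exactly the leading run of
-- equal keys: takeWhile, and the loop resumes at dropWhile (exact). grp[0] is p.2 (grp = p.2 :: _).
def pvGroup : List ((Int × Int) × String) → List String
  | [] => []
  | p :: rest =>
      let q := p.1.2
      let grp := p.2 :: (rest.takeWhile (fun r => r.1.2 == q)).map (fun r => r.2)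
      let line := if grp.length == 1 then PySem.Int.toStr q ++ " - " ++ p.2
                  else PySem.Int.toStr q ++ " - (" ++ PySem.Str.join ", " grp ++ ")"
      line :: pvGroup (rest.dropWhile (fun r => r.1.2 == q))
  termination_by l => l.length
  decreasing_by
    simp only [List.length_cons]
    exact Nat.lt_succ_of_le (List.length_dropWhile_le _ _)

def process_answers_alt (positions : List (Int × Int)) (answers : List String) : List String :=
  pvGroup (PySem.List.sorted (positions.zip answers) (fun pa => pa.1.2) false)

-- ===== PRECONDITION & SPEC =====
def Spec_process_answers (positions : List (Int × Int)) (answers : List String) (out : List String) : Prop := out = process_answers_alt positions answers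
instance (positions : List (Int × Int)) (answers : List String) (out : List String) : Decidable (Spec_process_answers positions answers out) := by unfold Spec_process_answers; infer_instance

-- ===== CLAIM (what is proved, stated in full; the proofs are below) =====
def Claim_equal_process_answers : Prop := ∀ (positions : List (Int × Int)) (answers : List String), Dom_process_answers positions answers → Spec_process_answers positions answers (process_answers positions answers)

-- ===== LEMMAS AND PROOFS =====

-- Shorthand for the proofs: the answers recorded for question q, in input order.
def pvAns (l : List ((Int × Int) × String)) (q : Int) : List String :=
  (l.filter (fun r => r.1.2 == q)).map (fun r => r.2)

-- A's grouping-loop step (definitionally the lambda inside process_answers).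
def pvStepA (d : PySem.Dict Int (List String)) (p : (Int × Int) × String) :
    PySem.Dict Int (List String) :=
  (if d.contains p.1.2 then d else d.insert p.1.2 []).modify p.1.2 [] (fun l => l ++ [p.2])

-- A's three-way formatting of one line.
def pvFmtA (q : Int) (g : List String) : String :=
  if g.length == 0 then PySem.Int.toStr q ++ " - null"
  else if g.length == 1 then PySem.Int.toStr q ++ " - " ++ ((PySem.List.pyGet? g 0).getD "")
  else PySem.Int.toStr q ++ " - (" ++ PySem.Str.join ", " g ++ ")"

-- B's two-way formatting of one (nonempty) group.
def pvFmtB (q : Int) (g : List String) : String :=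
  if g.length == 1 then PySem.Int.toStr q ++ " - " ++ g.headD ""
  else PySem.Int.toStr q ++ " - (" ++ PySem.Str.join ", " g ++ ")"

lemma pvFmt_eq (q : Int) (g : List String) (h : g ≠ []) : pvFmtA q g = pvFmtB q g := by
  cases g with
  | nil => exact absurd rfl h
  | cons x t =>
    cases t with
    | nil => simp [pvFmtA, pvFmtB, PySem.List.pyGet?, PySem.List.pyIdx?]
    | cons y t => simp [pvFmtA, pvFmtB]

lemma pvGetD_foldA (l : List ((Int × Int) × String)) (d : PySem.Dict Int (List String)) (q : Int) :
    (l.foldl pvStepA d).getD q [] = d.getD q [] ++ pvAns l q := by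
  induction l generalizing d with
  | nil => simp [pvAns]
  | cons p l ih =>
    rw [List.foldl_cons, ih]
    have hstep : (pvStepA d p).getD q [] =
        if q = p.1.2 then d.getD q [] ++ [p.2] else d.getD q [] := by
      unfold pvStepA
      cases h : d.contains p.1.2 with
      | true =>
        rw [if_pos rfl, PySem.Dict.getD_modify]
        split_ifs with h1
        · subst h1; rfl
        · rfl
      | false =>
        rw [if_neg (by decide),
          PySem.Dict.getD_modify]
        by_cases hq : q = p.1.2
        · subst hq
          simp [PySem.Dict.getD_of_not_contains d _ h]
        · simp [PySem.Dict.getD_insert, hq]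
    rw [hstep]
    by_cases hq : q = p.1.2
    · subst hq
      simp [pvAns]
    · have : (p.1.2 == q) = false := by simp [Ne.symm hq]
      simp [pvAns, this, hq]

lemma pvKeys_foldA (l : List ((Int × Int) × String)) (d : PySem.Dict Int (List String)) :
    (l.foldl pvStepA d).keys = PySem.Set.update d.keys (l.map (fun p => p.1.2)) := by
  induction l generalizing d with
  | nil => rfl
  | cons p l ih =>
    rw [List.foldl_cons, ih]
    have hkeys : (pvStepA d p).keys = PySem.Set.add d.keys p.1.2 := by
      unfold pvStepA
      cases h : d.contains p.1.2 with
      | true =>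
        rw [if_pos rfl, PySem.Dict.keys_modify, PySem.Dict.keys_insert_of_contains _ _ h]
        have hm : p.1.2 ∈ d.keys := (PySem.Dict.contains_iff_mem_keys d p.1.2).mp h
        simp [PySem.Set.add, hm]
      | false =>
        rw [if_neg (by decide),
          PySem.Dict.keys_modify,
          PySem.Dict.keys_insert_of_contains _ _ (by simp [PySem.Dict.contains_insert_self]),
          PySem.Dict.keys_insert_of_not_contains _ _ h]
        have hm : p.1.2 ∉ d.keys := fun hm => by
          simp [(PySem.Dict.contains_iff_mem_keys d p.1.2).mpr hm] at h
        simp [PySem.Set.add, hm]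
    rw [hkeys]
    rfl

lemma pvFoldl_append (g : Int → String) (ks : List Int) (acc : List String) :
    ks.foldl (fun acc q => acc ++ [g q]) acc = acc ++ ks.map g := by
  induction ks generalizing acc with
  | nil => simp
  | cons k ks ih => simp [ih]

lemma pvA_eq (positions : List (Int × Int)) (answers : List String) :
    process_answers positions answers =
      (PySem.List.sorted
        (PySem.Set.ofList ((positions.zip answers).map (fun p => p.1.2))) (fun x => x) false).map
        (fun q => pvFmtA q (pvAns (positions.zip answers) q)) := by
  show (PySem.List.sorted
      ((List.foldl pvStepA PySem.Dict.empty (positions.zip answers)).keys) (fun x => x) false).foldl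
      (fun acc question =>
        if ((List.foldl pvStepA PySem.Dict.empty (positions.zip answers)).getD question []).length == 0 then
          acc ++ [PySem.Int.toStr question ++ " - null"]
        else if ((List.foldl pvStepA PySem.Dict.empty (positions.zip answers)).getD question []).length == 1 then
          acc ++ [PySem.Int.toStr question ++ " - " ++
            ((PySem.List.pyGet? ((List.foldl pvStepA PySem.Dict.empty (positions.zip answers)).getD question []) 0).getD "")]
        else
          acc ++ [PySem.Int.toStr question ++ " - (" ++
            PySem.Str.join ", " ((List.foldl pvStepA PySem.Dict.empty (positions.zip answers)).getD question []) ++ ")"]) [] = _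
  have hkeys : (List.foldl pvStepA PySem.Dict.empty (positions.zip answers)).keys =
      PySem.Set.ofList ((positions.zip answers).map (fun p => p.1.2)) := by
    rw [pvKeys_foldA, PySem.Dict.keys_empty]; rfl
  have hget : ∀ q, (List.foldl pvStepA PySem.Dict.empty (positions.zip answers)).getD q [] =
      pvAns (positions.zip answers) q := by
    intro q; rw [pvGetD_foldA, PySem.Dict.getD_empty, List.nil_append]
  have hbody : (fun (acc : List String) (question : Int) =>
        if ((List.foldl pvStepA PySem.Dict.empty (positions.zip answers)).getD question []).length == 0 then
          acc ++ [PySem.Int.toStr question ++ " - null"]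
        else if ((List.foldl pvStepA PySem.Dict.empty (positions.zip answers)).getD question []).length == 1 then
          acc ++ [PySem.Int.toStr question ++ " - " ++
            ((PySem.List.pyGet? ((List.foldl pvStepA PySem.Dict.empty (positions.zip answers)).getD question []) 0).getD "")]
        else
          acc ++ [PySem.Int.toStr question ++ " - (" ++
            PySem.Str.join ", " ((List.foldl pvStepA PySem.Dict.empty (positions.zip answers)).getD question []) ++ ")"])
      = (fun acc question => acc ++ [pvFmtA question (pvAns (positions.zip answers) question)]) := by
    funext acc question
    rw [hget]
    unfold pvFmtA
    split_ifs <;> rfl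
  rw [hkeys, hbody, pvFoldl_append]
  rfl

-- ========== B side ==========

lemma pvPw_insertBy (x : (Int × Int) × String) (ys : List ((Int × Int) × String))
    (h : ys.Pairwise (fun a b => a.1.2 ≤ b.1.2)) :
    (PySem.List.insertBy (fun a b => decide (a.1.2 < b.1.2)) x ys).Pairwise
      (fun a b => a.1.2 ≤ b.1.2) := by
  induction ys with
  | nil => simp [PySem.List.insertBy]
  | cons y ys ih =>
    rw [List.pairwise_cons] at h
    by_cases hb : x.1.2 < y.1.2
    · simp only [PySem.List.insertBy, hb, decide_true, if_true]
      refine List.pairwise_cons.mpr ⟨?_, List.pairwise_cons.mpr ⟨h.1, h.2⟩⟩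
      intro z hz
      rcases List.mem_cons.mp hz with rfl | hz
      · exact le_of_lt hb
      · exact le_of_lt (lt_of_lt_of_le hb (h.1 _ hz))
    · rw [show PySem.List.insertBy (fun a b => decide (a.1.2 < b.1.2)) x (y :: ys) =
          y :: PySem.List.insertBy (fun a b => decide (a.1.2 < b.1.2)) x ys from by
        simp [PySem.List.insertBy, hb]]
      refine List.pairwise_cons.mpr ⟨?_, ih h.2⟩
      intro z hz
      rcases (PySem.List.mem_insertBy _ _ _ _).mp hz with hz | hz
      · subst hz; exact le_of_not_gt hb
      · exact h.1 _ hz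

lemma pvFilter_insertBy (q : Int) (x : (Int × Int) × String) (ys : List ((Int × Int) × String))
    (h : ys.Pairwise (fun a b => a.1.2 ≤ b.1.2)) :
    (PySem.List.insertBy (fun a b => decide (a.1.2 < b.1.2)) x ys).filter (fun r => r.1.2 == q) =
      if x.1.2 == q then ys.filter (fun r => r.1.2 == q) ++ [x]
      else ys.filter (fun r => r.1.2 == q) := by
  induction ys with
  | nil =>
    by_cases hx : x.1.2 = q <;> simp [PySem.List.insertBy, hx]
  | cons y ys ih =>
    rw [List.pairwise_cons] at h
    by_cases hb : x.1.2 < y.1.2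
    · rw [show PySem.List.insertBy (fun a b => decide (a.1.2 < b.1.2)) x (y :: ys) =
          x :: y :: ys from by simp [PySem.List.insertBy, hb]]
      by_cases hx : x.1.2 = q
      · subst hx
        have hys : (y :: ys).filter (fun r => r.1.2 == x.1.2) = [] := by
          rw [List.filter_eq_nil_iff]
          intro a ha
          rcases List.mem_cons.mp ha with rfl | ha
          · simp; omega
          · have := h.1 _ ha; simp; omega
        rw [List.filter_cons_of_pos (by simp), hys]
        simp
      · have hxq : (x.1.2 == q) = false := by simp [hx]
        rw [List.filter_cons_of_neg (by simp [hx]), hxq]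
        simp
    · rw [show PySem.List.insertBy (fun a b => decide (a.1.2 < b.1.2)) x (y :: ys) =
          y :: PySem.List.insertBy (fun a b => decide (a.1.2 < b.1.2)) x ys from by
        simp [PySem.List.insertBy, hb]]
      rw [List.filter_cons, ih h.2, List.filter_cons]
      split_ifs <;> simp

lemma pvFilter_foldl_insertBy (q : Int) (l acc : List ((Int × Int) × String))
    (h : acc.Pairwise (fun a b => a.1.2 ≤ b.1.2)) :
    (l.foldl (fun acc x => PySem.List.insertBy (fun a b => decide (a.1.2 < b.1.2)) x acc) acc).filter
        (fun r => r.1.2 == q) =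
      acc.filter (fun r => r.1.2 == q) ++ l.filter (fun r => r.1.2 == q) := by
  induction l generalizing acc with
  | nil => simp
  | cons x l ih =>
    rw [List.foldl_cons, ih _ (pvPw_insertBy x acc h), pvFilter_insertBy q x acc h,
      List.filter_cons]
    split_ifs <;> simp

lemma pvStab (l : List ((Int × Int) × String)) (q : Int) :
    (PySem.List.sorted l (fun p => p.1.2) false).filter (fun r => r.1.2 == q) =
      l.filter (fun r => r.1.2 == q) := by
  rw [PySem.List.sorted_eq_foldl_insertBy l (fun p => p.1.2),
    pvFilter_foldl_insertBy q l [] (by simp)]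
  simp

lemma pvDrop_gt (q : Int) (l : List ((Int × Int) × String))
    (hp : l.Pairwise (fun a b => a.1.2 ≤ b.1.2)) (hq : ∀ r ∈ l, q ≤ r.1.2) :
    ∀ r ∈ l.dropWhile (fun r => r.1.2 == q), q < r.1.2 := by
  induction l with
  | nil => simp
  | cons a l ih =>
    rw [List.pairwise_cons] at hp
    by_cases ha : a.1.2 = q
    · rw [List.dropWhile_cons_of_pos (by simp [ha])]
      exact ih hp.2 (fun r hr => hq r (by simp [hr]))
    · rw [List.dropWhile_cons_of_neg (by simp [ha])]
      intro r hr
      have haq : q < a.1.2 := lt_of_le_of_ne (hq a (by simp)) (Ne.symm ha)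
      rcases List.mem_cons.mp hr with rfl | hr
      · exact haq
      · exact lt_of_lt_of_le haq (hp.1 _ hr)

lemma pvGroup_eq (n : Nat) : ∀ (s : List ((Int × Int) × String)), s.length ≤ n →
    s.Pairwise (fun a b => a.1.2 ≤ b.1.2) →
    pvGroup s =
      (PySem.List.sorted (PySem.Set.ofList (s.map (fun p => p.1.2))) (fun x => x) false).map
        (fun q => pvFmtB q (pvAns s q)) := by
  induction n with
  | zero =>
    intro s hlen _
    have : s = [] := List.length_eq_zero_iff.mp (Nat.le_zero.mp hlen)
    subst this
    simp [pvGroup, PySem.List.sorted_eq_nil_iff]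
  | succ n ih =>
    intro s hlen hpw
    cases s with
    | nil => simp [pvGroup, PySem.List.sorted_eq_nil_iff]
    | cons p rest =>
      rw [List.pairwise_cons] at hpw
      have hpw1 : ∀ r ∈ rest, p.1.2 ≤ r.1.2 := hpw.1
      have hrest : rest.takeWhile (fun r => r.1.2 == p.1.2) ++
          rest.dropWhile (fun r => r.1.2 == p.1.2) = rest := List.takeWhile_append_dropWhile
      have htailpw : (rest.dropWhile (fun r => r.1.2 == p.1.2)).Pairwise
          (fun a b => a.1.2 ≤ b.1.2) :=
        List.Pairwise.sublist (List.dropWhile_sublist _) hpw.2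
      have htailgt : ∀ r ∈ rest.dropWhile (fun r => r.1.2 == p.1.2), p.1.2 < r.1.2 :=
        pvDrop_gt p.1.2 rest hpw.2 hpw1
      have htakeq : ∀ r ∈ rest.takeWhile (fun r => r.1.2 == p.1.2), r.1.2 = p.1.2 := fun r hr => by
        simpa using List.mem_takeWhile_imp hr
      -- the leading run is exactly the p.1.2-filter of s
      have hfil_rest : rest.filter (fun r => r.1.2 == p.1.2) =
          rest.takeWhile (fun r => r.1.2 == p.1.2) := by
        conv_lhs => rw [← hrest]
        rw [List.filter_append,
          List.filter_eq_self.mpr (fun a ha => by simp [htakeq a ha]),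
          List.filter_eq_nil_iff.mpr (fun a ha => by
            simp only [beq_iff_eq]
            exact fun hh => absurd (htailgt a ha) (by omega)),
          List.append_nil]
      have hfilq : (p :: rest).filter (fun r => r.1.2 == p.1.2) =
          p :: rest.takeWhile (fun r => r.1.2 == p.1.2) := by
        rw [List.filter_cons_of_pos (by simp), hfil_rest]
      -- later questions only live in the tail
      have hfilgt : ∀ q', p.1.2 < q' →
          (p :: rest).filter (fun r => r.1.2 == q') =
            (rest.dropWhile (fun r => r.1.2 == p.1.2)).filter (fun r => r.1.2 == q') := by
        intro q' hq'
        rw [List.filter_cons_of_neg (by simp; omega)]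
        conv_lhs => rw [← hrest]
        rw [List.filter_append,
          List.filter_eq_nil_iff.mpr (fun a ha => by simp [htakeq a ha]; omega),
          List.nil_append]
      -- the sorted distinct keys of s are p.1.2 followed by those of the tail
      have hmemtail : ∀ a, (a ∈ PySem.List.sorted
            (PySem.Set.ofList ((rest.dropWhile (fun r => r.1.2 == p.1.2)).map (fun p => p.1.2)))
            (fun x => x) false) ↔
          a ∈ (rest.dropWhile (fun r => r.1.2 == p.1.2)).map (fun p => p.1.2) := by
        intro a
        rw [PySem.List.mem_sorted, PySem.Set.mem_ofList]
      have hkeys : PySem.List.sorted (PySem.Set.ofList ((p :: rest).map (fun p => p.1.2)))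
            (fun x => x) false =
          p.1.2 :: PySem.List.sorted
            (PySem.Set.ofList ((rest.dropWhile (fun r => r.1.2 == p.1.2)).map (fun p => p.1.2)))
            (fun x => x) false := by
        apply PySem.List.sorted_eq_of_perm_of_pairwise_lt
        · have hnd1 : (p.1.2 :: PySem.List.sorted
              (PySem.Set.ofList ((rest.dropWhile (fun r => r.1.2 == p.1.2)).map (fun p => p.1.2)))
              (fun x => x) false).Nodup := by
            refine List.nodup_cons.mpr ⟨?_, ?_⟩
            · intro hmem
              rcases List.mem_map.mp ((hmemtail _).mp hmem) with ⟨r, hr, hrk⟩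
              exact absurd (htailgt r hr) (by omega)
            · exact (PySem.List.sorted_ofList_pairwise_lt _).imp (fun h => ne_of_lt h)
          refine (List.perm_ext_iff_of_nodup hnd1 (PySem.Set.nodup_ofList _)).mpr ?_
          intro a
          rw [List.mem_cons, hmemtail, PySem.Set.mem_ofList]
          constructor
          · rintro (rfl | ha)
            · exact List.mem_map.mpr ⟨p, by simp, rfl⟩
            · rcases List.mem_map.mp ha with ⟨r, hr, hrk⟩
              refine List.mem_map.mpr ⟨r, ?_, hrk⟩
              exact List.mem_cons.mpr (Or.inr (hrest ▸ List.mem_append.mpr (Or.inr hr)))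
          · intro ha
            rcases List.mem_map.mp ha with ⟨r, hr, hrk⟩
            rcases List.mem_cons.mp hr with rfl | hr
            · exact Or.inl hrk.symm
            · rw [← hrest] at hr
              rcases List.mem_append.mp hr with hr | hr
              · exact Or.inl (by rw [← hrk, htakeq r hr])
              · exact Or.inr (List.mem_map.mpr ⟨r, hr, hrk⟩)
        · refine List.pairwise_cons.mpr ⟨?_, PySem.List.sorted_ofList_pairwise_lt _⟩
          intro a ha
          rcases List.mem_map.mp ((hmemtail _).mp ha) with ⟨r, hr, hrk⟩
          rw [← hrk]
          exact htailgt r hr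
      -- unfold one step of pvGroup
      rw [show pvGroup (p :: rest) =
          (if (p.2 :: (rest.takeWhile (fun r => r.1.2 == p.1.2)).map (fun r => r.2)).length == 1 then
             PySem.Int.toStr p.1.2 ++ " - " ++ p.2
           else PySem.Int.toStr p.1.2 ++ " - (" ++
             PySem.Str.join ", "
               (p.2 :: (rest.takeWhile (fun r => r.1.2 == p.1.2)).map (fun r => r.2)) ++ ")") ::
            pvGroup (rest.dropWhile (fun r => r.1.2 == p.1.2)) from by
        rw [pvGroup]]
      rw [hkeys, List.map_cons]
      have hlen' : (rest.dropWhile (fun r => r.1.2 == p.1.2)).length ≤ n := by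
        have h1 : (rest.dropWhile (fun r => r.1.2 == p.1.2)).length ≤ rest.length :=
          (List.dropWhile_sublist _).length_le
        simp only [List.length_cons] at hlen
        omega
      rw [ih _ hlen' htailpw]
      congr 1
      · -- the head line
        have hgrp : pvAns (p :: rest) p.1.2 =
            p.2 :: (rest.takeWhile (fun r => r.1.2 == p.1.2)).map (fun r => r.2) := by
          rw [pvAns, hfilq, List.map_cons]
        rw [pvFmtB, hgrp]
        split_ifs <;> rfl
      · -- the mapped tail
        apply List.map_congr_left
        intro q' hq'
        rcases List.mem_map.mp ((hmemtail _).mp hq') with ⟨r, hr, hrk⟩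
        have hgt : p.1.2 < q' := hrk ▸ htailgt r hr
        rw [pvAns, pvAns, hfilgt q' hgt]

lemma pvB_eq (positions : List (Int × Int)) (answers : List String) :
    process_answers_alt positions answers =
      (PySem.List.sorted
        (PySem.Set.ofList ((positions.zip answers).map (fun p => p.1.2))) (fun x => x) false).map
        (fun q => pvFmtB q (pvAns (positions.zip answers) q)) := by
  rw [process_answers_alt,
    pvGroup_eq (PySem.List.sorted (positions.zip answers) (fun pa => pa.1.2) false).length _
      le_rfl (PySem.List.sorted_pairwise _ _)]
  have hperm : (PySem.Set.ofList
        ((PySem.List.sorted (positions.zip answers) (fun pa => pa.1.2) false).map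
          (fun p => p.1.2))).Perm
      (PySem.Set.ofList ((positions.zip answers).map (fun p => p.1.2))) := by
    refine (List.perm_ext_iff_of_nodup (PySem.Set.nodup_ofList _) (PySem.Set.nodup_ofList _)).mpr ?_
    intro a
    rw [PySem.Set.mem_ofList, PySem.Set.mem_ofList]
    exact List.Perm.mem_iff ((PySem.List.sorted_perm _ _ _).map _)
  rw [PySem.List.sorted_eq_sorted_of_perm _ _ _ (fun a b h => h) hperm]
  apply List.map_congr_left
  intro q _
  rw [pvAns, pvAns, pvStab]

lemma pvAB (positions : List (Int × Int)) (answers : List String) :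
    process_answers positions answers = process_answers_alt positions answers := by
  rw [pvA_eq, pvB_eq]
  apply List.map_congr_left
  intro q hq
  rcases List.mem_map.mp ((PySem.Set.mem_ofList _ _).mp
    ((PySem.List.mem_sorted _ _ _ _).mp hq)) with ⟨r, hr, hrk⟩
  apply pvFmt_eq
  intro hnil
  have : r ∈ (positions.zip answers).filter (fun x => x.1.2 == q) :=
    List.mem_filter.mpr ⟨hr, by simp [hrk]⟩
  rw [pvAns] at hnil
  simp only [List.map_eq_nil_iff] at hnil
  rw [hnil] at this
  exact absurd this (List.not_mem_nil)

-- ===== VERDICT (by name: the statement is the Claim_ definition above) =====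
theorem process_answers_spec : Claim_equal_process_answers := by
  intro positions answers _
  show process_answers positions answers = process_answers_alt positions answers
  exact pvAB positions answers
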